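-- pv_equiv track=rewrite | github.com/uma-c/CodingProblemSolving | dynamic_prog/square_submatrix.py | max_square_submatrix_dp
-- ===== SOURCE A (Python) =====
-- from typing import List
--
-- def max_square_submatrix_dp(matrix: List[List[bool]], cache: List[List[int]], i: int, j: int) -> int:
--     m = len(matrix) # rows
--     n = len(matrix[0]) if m > 0 else 0 # columns
--     if not (i < m and j < n):
--         return 0
--     if not cache[i][j] < 0:
--         return cache[i][j]
--
--     if matrix[i][j]:
--         i_1_j = max_square_submatrix_dp(matrix, cache, i + 1, j)
--         i_j_1 = max_square_submatrix_dp(matrix, cache, i, j + 1)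
--         i_1_j_1 = max_square_submatrix_dp(matrix, cache, i + 1, j + 1)
--         return 1 + min(i_1_j, i_j_1, i_1_j_1)
--     else:
--         return 0
-- ===== SOURCE B (Python) =====
-- from typing import List
--
-- def max_square_submatrix_dp(matrix: List[List[bool]], cache: List[List[int]], i: int, j: int) -> int:
--     m = len(matrix)
--     n = len(matrix[0]) if m > 0 else 0
--     if not (i < m and j < n):
--         return 0
--     dp = {}
--     for r in range(m - 1, i - 1, -1):
--         for c in range(n - 1, j - 1, -1):
--             if cache[r][c] >= 0:
--                 dp[(r, c)] = cache[r][c]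
--             elif matrix[r][c]:
--                 dp[(r, c)] = 1 + min(dp.get((r + 1, c), 0),
--                                      dp.get((r, c + 1), 0),
--                                      dp.get((r + 1, c + 1), 0))
--             else:
--                 dp[(r, c)] = 0
--     return dp[(i, j)]
-- ===== Notes on version B (the rewrite author's own statement) =====
-- stated objective: alternative
-- what changed: B replaces A's top-down recursion (which never writes to the cache it was given) by a bottom-up iterative DP that fills a dictionary once, row by row from the bottom-right corner, and reads the answer off at (i, j).
-- outside the precondition, e.g. on max_square_submatrix_dp([[True, True]], [[3]], 0, 0): A returns 3, B raises IndexError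
import Mathlib
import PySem

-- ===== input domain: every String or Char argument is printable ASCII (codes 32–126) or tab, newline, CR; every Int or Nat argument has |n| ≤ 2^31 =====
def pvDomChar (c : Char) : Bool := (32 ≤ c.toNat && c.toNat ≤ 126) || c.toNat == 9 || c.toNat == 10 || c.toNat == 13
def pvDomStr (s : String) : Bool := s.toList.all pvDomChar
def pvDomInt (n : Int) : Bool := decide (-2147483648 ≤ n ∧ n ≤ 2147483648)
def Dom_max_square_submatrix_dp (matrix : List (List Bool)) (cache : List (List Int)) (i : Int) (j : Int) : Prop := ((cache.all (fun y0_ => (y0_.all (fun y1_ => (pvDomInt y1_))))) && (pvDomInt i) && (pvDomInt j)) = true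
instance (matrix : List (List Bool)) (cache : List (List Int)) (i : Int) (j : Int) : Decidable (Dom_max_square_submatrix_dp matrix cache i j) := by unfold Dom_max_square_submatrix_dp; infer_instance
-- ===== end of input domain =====

-- B computes the same result with a bottom-up iterative DP over a dictionary instead of
-- A's top-down recursion (the cache argument is still consulted, read-only, exactly as A does).

-- shared accessor: Python's xss[r][c] (negative indices wrap); the default is returned
-- only where Python would raise IndexError, i.e. outside Pre_.
def pvGet2 {α : Type} (xss : List (List α)) (r c : Int) (d : α) : α :=
  (((PySem.List.pyGet? xss r).bind (fun row => PySem.List.pyGet? row c)).getD d)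

-- ===== PORT A =====
-- A's recursion, with a structural fuel guard for totality only: the wrapper passes
-- fuel strictly greater than the decreasing measure (m - i) + (n - j), so the 0-fuel
-- branch is never reached (pv_go_eq below); each step is A's code line for line.
def max_square_submatrix_dp_go (fuel : Nat) (matrix : List (List Bool)) (cache : List (List Int)) (i : Int) (j : Int) : Int :=
  match fuel with
  | 0 => 0
  | fuel + 1 =>
    let m : Int := matrix.length
    let n : Int := if 0 < m then ((matrix.headD []).length : Int) else 0
    if i < m ∧ j < n then
      if ¬ (pvGet2 cache i j (-1) < 0) then pvGet2 cache i j (-1)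
      else if pvGet2 matrix i j false then
        let i_1_j := max_square_submatrix_dp_go fuel matrix cache (i + 1) j
        let i_j_1 := max_square_submatrix_dp_go fuel matrix cache i (j + 1)
        let i_1_j_1 := max_square_submatrix_dp_go fuel matrix cache (i + 1) (j + 1)
        1 + min i_1_j (min i_j_1 i_1_j_1)
      else 0
    else 0

def max_square_submatrix_dp (matrix : List (List Bool)) (cache : List (List Int)) (i : Int) (j : Int) : Int :=
  max_square_submatrix_dp_go ((((matrix.length : Int) - i) + (((matrix.headD []).length : Int) - j)).toNat + 1) matrix cache i j

-- ===== PORT B =====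
def max_square_submatrix_dp_alt (matrix : List (List Bool)) (cache : List (List Int)) (i : Int) (j : Int) : Int :=
  let m : Int := matrix.length
  let n : Int := if 0 < m then ((matrix.headD []).length : Int) else 0
  if i < m ∧ j < n then
    let dp : PySem.Dict (Int × Int) Int :=
      (PySem.List.pyRange (m - 1) (i - 1) (-1)).foldl (fun dp r =>
        (PySem.List.pyRange (n - 1) (j - 1) (-1)).foldl (fun dp c =>
          if pvGet2 cache r c (-1) ≥ 0 then dp.insert (r, c) (pvGet2 cache r c (-1))
          else if pvGet2 matrix r c false then
            dp.insert (r, c)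
              (1 + min (dp.getD (r + 1, c) 0) (min (dp.getD (r, c + 1) 0) (dp.getD (r + 1, c + 1) 0)))
          else dp.insert (r, c) 0) dp) PySem.Dict.empty
    dp.getD (i, j) 0   -- dp[(i, j)]: the key is always written when the guard holds
  else 0

-- ===== PRECONDITION & SPEC =====
-- Pre_ excludes ragged or mismatched matrix/cache shapes and indices below -m/-n: there
-- A's recursion raises IndexError (or, on a mismatched cache, returns only by accident of
-- a cache hit occurring before the out-of-range access); both are outside the natural domain.
def Pre_max_square_submatrix_dp (matrix : List (List Bool)) (cache : List (List Int)) (i : Int) (j : Int) : Prop :=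
  (matrix.length : Int) ≤ i ∨
  (if 0 < (matrix.length : Int) then ((matrix.headD []).length : Int) else 0) ≤ j ∨
  (-(matrix.length : Int) ≤ i ∧ -((matrix.headD []).length : Int) ≤ j ∧
    (∀ row ∈ matrix, row.length = (matrix.headD []).length) ∧
    cache.length = matrix.length ∧
    (∀ row ∈ cache, row.length = (matrix.headD []).length))
instance (matrix : List (List Bool)) (cache : List (List Int)) (i : Int) (j : Int) : Decidable (Pre_max_square_submatrix_dp matrix cache i j) := by unfold Pre_max_square_submatrix_dp; infer_instance

def pvWitness_max_square_submatrix_dp : List (List Bool) × List (List Int) × Int × Int :=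
  ([[true, true], [true, true]], [[-1, -1], [-1, -1]], 0, 0)

def Spec_max_square_submatrix_dp (matrix : List (List Bool)) (cache : List (List Int)) (i : Int) (j : Int) (out : Int) : Prop := out = max_square_submatrix_dp_alt matrix cache i j
instance (matrix : List (List Bool)) (cache : List (List Int)) (i : Int) (j : Int) (out : Int) : Decidable (Spec_max_square_submatrix_dp matrix cache i j out) := by unfold Spec_max_square_submatrix_dp; infer_instance

-- ===== CLAIM (what is proved, stated in full; the proofs are below) =====
def Claim_equal_max_square_submatrix_dp : Prop := ∀ (matrix : List (List Bool)) (cache : List (List Int)) (i : Int) (j : Int), Dom_max_square_submatrix_dp matrix cache i j → Pre_max_square_submatrix_dp matrix cache i j → Spec_max_square_submatrix_dp matrix cache i j (max_square_submatrix_dp matrix cache i j)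

-- ===== LEMMAS AND PROOFS =====

-- number of columns, as both ports compute it
def pvN (matrix : List (List Bool)) : Int :=
  if 0 < (matrix.length : Int) then ((matrix.headD []).length : Int) else 0

-- the loop invariant: rows strictly below r (and row r from column c on) hold A's values
def pvInv (matrix : List (List Bool)) (cache : List (List Int)) (j : Int)
    (dp : PySem.Dict (Int × Int) Int) (r c : Int) : Prop :=
  ∀ r' c' : Int, dp.getD (r', c') 0 =
    if (r < r' ∨ (r' = r ∧ c ≤ c')) ∧ j ≤ c'
    then max_square_submatrix_dp matrix cache r' c' else 0

def pvFuel (matrix : List (List Bool)) (i j : Int) : Nat :=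
  (((matrix.length : Int) - i) + (((matrix.headD []).length : Int) - j)).toNat

theorem pv_bound (matrix : List (List Bool)) (i j : Int)
    (h1 : i < (matrix.length : Int)) (h2 : j < pvN matrix) :
    j < ((matrix.headD []).length : Int) := by
  unfold pvN at h2
  by_cases h0 : 0 < (matrix.length : Int)
  · rwa [if_pos h0] at h2
  · omega

theorem pv_go_eq (matrix : List (List Bool)) (cache : List (List Int)) :
    ∀ (f1 : Nat) (i j : Int) (f2 : Nat), pvFuel matrix i j < f1 → pvFuel matrix i j < f2 →
    max_square_submatrix_dp_go f1 matrix cache i j = max_square_submatrix_dp_go f2 matrix cache i j := by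
  intro f1
  induction f1 with
  | zero => intro i j f2 h1 _; omega
  | succ f1 ih =>
    intro i j f2 h1 h2
    match f2 with
    | 0 => omega
    | f2 + 1 =>
      show max_square_submatrix_dp_go (f1 + 1) matrix cache i j
          = max_square_submatrix_dp_go (f2 + 1) matrix cache i j
      rw [max_square_submatrix_dp_go, max_square_submatrix_dp_go]
      by_cases hg : i < ((matrix.length : Int)) ∧
          j < (if 0 < (matrix.length : Int) then ((matrix.headD []).length : Int) else 0)
      · rw [if_pos hg, if_pos hg]
        have hb : j < ((matrix.headD []).length : Int) := pv_bound matrix i j hg.1 (by unfold pvN; exact hg.2)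
        have d1 : pvFuel matrix (i + 1) j < pvFuel matrix i j := by unfold pvFuel; omega
        have d2 : pvFuel matrix i (j + 1) < pvFuel matrix i j := by unfold pvFuel; omega
        have d3 : pvFuel matrix (i + 1) (j + 1) < pvFuel matrix i j := by unfold pvFuel; omega
        rw [ih (i + 1) j f2 (by omega) (by omega), ih i (j + 1) f2 (by omega) (by omega),
            ih (i + 1) (j + 1) f2 (by omega) (by omega)]
      · rw [if_neg hg, if_neg hg]

theorem pv_f_zero (matrix : List (List Bool)) (cache : List (List Int)) (i j : Int)
    (h : (matrix.length : Int) ≤ i ∨ pvN matrix ≤ j) :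
    max_square_submatrix_dp matrix cache i j = 0 := by
  unfold max_square_submatrix_dp
  rw [max_square_submatrix_dp_go]
  rw [if_neg]
  simp only [pvN] at h
  omega

theorem pv_inv_empty (matrix : List (List Bool)) (cache : List (List Int)) (j : Int) :
    pvInv matrix cache j PySem.Dict.empty ((matrix.length : Int) - 1) (pvN matrix) := by
  intro r' c'
  rw [PySem.Dict.getD_empty]
  split_ifs with h
  · exact (pv_f_zero matrix cache r' c' (by omega)).symm
  · rfl

theorem pv_f_in (matrix : List (List Bool)) (cache : List (List Int)) (i j : Int)
    (h1 : i < (matrix.length : Int)) (h2 : j < pvN matrix) :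
    max_square_submatrix_dp matrix cache i j =
      if pvGet2 cache i j (-1) ≥ 0 then pvGet2 cache i j (-1)
      else if pvGet2 matrix i j false then
        1 + min (max_square_submatrix_dp matrix cache (i + 1) j)
          (min (max_square_submatrix_dp matrix cache i (j + 1)) (max_square_submatrix_dp matrix cache (i + 1) (j + 1)))
      else 0 := by
  have hb : j < ((matrix.headD []).length : Int) := pv_bound matrix i j h1 h2
  conv_lhs => rw [max_square_submatrix_dp]
  rw [max_square_submatrix_dp_go]
  rw [if_pos (show i < ((matrix.length : Int)) ∧ j < (if 0 < (matrix.length : Int) then ((matrix.headD []).length : Int) else 0) from ⟨h1, by unfold pvN at h2; exact h2⟩)]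
  have r1 : max_square_submatrix_dp_go (pvFuel matrix i j) matrix cache (i + 1) j
      = max_square_submatrix_dp matrix cache (i + 1) j := by
    unfold max_square_submatrix_dp
    exact pv_go_eq matrix cache _ _ _ _ (by unfold pvFuel; omega) (by unfold pvFuel; omega)
  have r2 : max_square_submatrix_dp_go (pvFuel matrix i j) matrix cache i (j + 1)
      = max_square_submatrix_dp matrix cache i (j + 1) := by
    unfold max_square_submatrix_dp
    exact pv_go_eq matrix cache _ _ _ _ (by unfold pvFuel; omega) (by unfold pvFuel; omega)
  have r3 : max_square_submatrix_dp_go (pvFuel matrix i j) matrix cache (i + 1) (j + 1)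
      = max_square_submatrix_dp matrix cache (i + 1) (j + 1) := by
    unfold max_square_submatrix_dp
    exact pv_go_eq matrix cache _ _ _ _ (by unfold pvFuel; omega) (by unfold pvFuel; omega)
  show (if ¬ pvGet2 cache i j (-1) < 0 then pvGet2 cache i j (-1)
    else if pvGet2 matrix i j false then
      1 + min (max_square_submatrix_dp_go (pvFuel matrix i j) matrix cache (i + 1) j)
        (min (max_square_submatrix_dp_go (pvFuel matrix i j) matrix cache i (j + 1))
          (max_square_submatrix_dp_go (pvFuel matrix i j) matrix cache (i + 1) (j + 1)))
    else 0) = _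
  rw [r1, r2, r3]
  split_ifs with g1 g2 <;> first | rfl | omega

theorem pv_step (matrix : List (List Bool)) (cache : List (List Int)) (j : Int)
    (dp : PySem.Dict (Int × Int) Int) (r c : Int)
    (hr : r < (matrix.length : Int)) (hc1 : j ≤ c) (hc2 : c < pvN matrix)
    (hInv : pvInv matrix cache j dp r (c + 1)) :
    pvInv matrix cache j
      (if pvGet2 cache r c (-1) ≥ 0 then dp.insert (r, c) (pvGet2 cache r c (-1))
       else if pvGet2 matrix r c false then
         dp.insert (r, c)
           (1 + min (dp.getD (r + 1, c) 0) (min (dp.getD (r, c + 1) 0) (dp.getD (r + 1, c + 1) 0)))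
       else dp.insert (r, c) 0) r c := by
  have e1 : dp.getD (r + 1, c) 0 = max_square_submatrix_dp matrix cache (r + 1) c := by
    rw [hInv]; rw [if_pos ⟨Or.inl (by omega), hc1⟩]
  have e2 : dp.getD (r, c + 1) 0 = max_square_submatrix_dp matrix cache r (c + 1) := by
    rw [hInv]; rw [if_pos ⟨Or.inr ⟨rfl, le_refl _⟩, by omega⟩]
  have e3 : dp.getD (r + 1, c + 1) 0 = max_square_submatrix_dp matrix cache (r + 1) (c + 1) := by
    rw [hInv]; rw [if_pos ⟨Or.inl (by omega), by omega⟩]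
  have hone : (if pvGet2 cache r c (-1) ≥ 0 then dp.insert (r, c) (pvGet2 cache r c (-1))
       else if pvGet2 matrix r c false then
         dp.insert (r, c)
           (1 + min (dp.getD (r + 1, c) 0) (min (dp.getD (r, c + 1) 0) (dp.getD (r + 1, c + 1) 0)))
       else dp.insert (r, c) 0) = dp.insert (r, c) (max_square_submatrix_dp matrix cache r c) := by
    rw [pv_f_in matrix cache r c hr hc2, e1, e2, e3]
    split_ifs <;> rfl
  rw [hone]
  intro r' c'
  rw [PySem.Dict.getD_insert]
  by_cases hk : (r', c') = ((r, c) : Int × Int)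
  · rw [if_pos hk]
    have ha : r' = r := congrArg Prod.fst hk
    have hb : c' = c := congrArg Prod.snd hk
    subst ha; subst hb
    rw [if_pos ⟨Or.inr ⟨rfl, le_refl _⟩, hc1⟩]
  · rw [if_neg hk]
    rw [hInv r' c']
    have hne : ¬ (r' = r ∧ c' = c) := fun ⟨a, b⟩ => hk (by rw [a, b])
    by_cases hcnd : (r < r' ∨ (r' = r ∧ c ≤ c')) ∧ j ≤ c'
    · rw [if_pos hcnd, if_pos (by omega)]
    · rw [if_neg hcnd, if_neg (by omega)]

theorem pv_inner (matrix : List (List Bool)) (cache : List (List Int)) (j r : Int)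
    (hr : r < (matrix.length : Int)) :
    ∀ (k : Nat) (c0 : Int), c0 - (j - 1) = k → c0 < pvN matrix →
    ∀ dp : PySem.Dict (Int × Int) Int, pvInv matrix cache j dp r (c0 + 1) →
    pvInv matrix cache j
      ((PySem.List.pyRange c0 (j - 1) (-1)).foldl (fun dp c =>
        if pvGet2 cache r c (-1) ≥ 0 then dp.insert (r, c) (pvGet2 cache r c (-1))
        else if pvGet2 matrix r c false then
          dp.insert (r, c)
            (1 + min (dp.getD (r + 1, c) 0) (min (dp.getD (r, c + 1) 0) (dp.getD (r + 1, c + 1) 0)))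
        else dp.insert (r, c) 0) dp) r j := by
  intro k
  induction k with
  | zero =>
    intro c0 hc0 _ dp hInv
    have : c0 = j - 1 := by omega
    subst this
    rw [PySem.List.pyRange_neg_one_eq_nil (le_refl _)]
    simpa using hInv
  | succ k ih =>
    intro c0 hc0 hcn dp hInv
    rw [PySem.List.pyRange_neg_one_cons (by omega)]
    rw [List.foldl_cons]
    exact ih (c0 - 1) (by omega) (by omega) _
      (by simpa using pv_step matrix cache j dp r c0 hr (by omega) hcn hInv)

theorem pv_shift (matrix : List (List Bool)) (cache : List (List Int)) (j r : Int)
    (dp : PySem.Dict (Int × Int) Int) (hInv : pvInv matrix cache j dp r j) :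
    pvInv matrix cache j dp (r - 1) (pvN matrix) := by
  intro r' c'
  rw [hInv r' c']
  by_cases hnew : (r - 1 < r' ∨ (r' = r - 1 ∧ pvN matrix ≤ c')) ∧ j ≤ c'
  · rw [if_pos hnew]
    by_cases hold : (r < r' ∨ (r' = r ∧ j ≤ c')) ∧ j ≤ c'
    · rw [if_pos hold]
    · rw [if_neg hold]
      have : pvN matrix ≤ c' := by
        rcases hnew with ⟨h1 | ⟨h1, h2⟩, h3⟩
        · exact absurd ⟨by omega, h3⟩ hold
        · exact h2
      exact (pv_f_zero matrix cache r' c' (Or.inr this)).symm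
  · rw [if_neg hnew]
    rw [if_neg (fun ⟨h1, h2⟩ => hnew ⟨by omega, h2⟩)]

theorem pv_outer (matrix : List (List Bool)) (cache : List (List Int)) (i j : Int)
    (hj : j < pvN matrix) :
    ∀ (k : Nat) (a : Int), a - (i - 1) = k → a < (matrix.length : Int) →
    ∀ dp : PySem.Dict (Int × Int) Int, pvInv matrix cache j dp a (pvN matrix) →
    pvInv matrix cache j
      ((PySem.List.pyRange a (i - 1) (-1)).foldl (fun dp r =>
        (PySem.List.pyRange (pvN matrix - 1) (j - 1) (-1)).foldl (fun dp c =>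
          if pvGet2 cache r c (-1) ≥ 0 then dp.insert (r, c) (pvGet2 cache r c (-1))
          else if pvGet2 matrix r c false then
            dp.insert (r, c)
              (1 + min (dp.getD (r + 1, c) 0) (min (dp.getD (r, c + 1) 0) (dp.getD (r + 1, c + 1) 0)))
          else dp.insert (r, c) 0) dp) dp) (i - 1) (pvN matrix) := by
  intro k
  induction k with
  | zero =>
    intro a ha _ dp hInv
    have : a = i - 1 := by omega
    subst this
    rw [PySem.List.pyRange_neg_one_eq_nil (le_refl _)]
    exact hInv
  | succ k ih =>
    intro a ha ham dp hInv
    rw [show PySem.List.pyRange a (i - 1) (-1) = a :: PySem.List.pyRange (a - 1) (i - 1) (-1)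
        from PySem.List.pyRange_neg_one_cons (by omega)]
    rw [List.foldl_cons]
    refine ih (a - 1) (by omega) (by omega) _ ?_
    refine pv_shift matrix cache j a _ ?_
    exact pv_inner matrix cache j a ham ((pvN matrix - 1) - (j - 1)).toNat (pvN matrix - 1)
      (by omega) (by omega) dp (by simpa using hInv)

theorem pv_main (matrix : List (List Bool)) (cache : List (List Int)) (i j : Int) :
    max_square_submatrix_dp matrix cache i j = max_square_submatrix_dp_alt matrix cache i j := by
  unfold max_square_submatrix_dp_alt
  by_cases h : i < (matrix.length : Int) ∧
      j < (if 0 < (matrix.length : Int) then ((matrix.headD []).length : Int) else 0)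
  · rw [if_pos h]
    have hn : (if 0 < (matrix.length : Int) then ((matrix.headD []).length : Int) else 0) = pvN matrix := rfl
    have hfin := pv_outer matrix cache i j (by rw [← hn]; exact h.2)
      ((matrix.length : Int) - 1 - (i - 1)).toNat ((matrix.length : Int) - 1)
      (by omega) (by omega) PySem.Dict.empty (pv_inv_empty matrix cache j)
    have := hfin i j
    rw [if_pos ⟨Or.inl (by omega), le_refl _⟩] at this
    rw [hn]
    exact this.symm
  · rw [if_neg h]
    refine pv_f_zero matrix cache i j ?_
    simp only [pvN]
    omega

-- ===== VERDICT (by name: the statement is the Claim_ definition above) =====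
theorem max_square_submatrix_dp_spec : Claim_equal_max_square_submatrix_dp := by
  intro matrix cache i j _ _
  unfold Spec_max_square_submatrix_dp
  exact pv_main matrix cache i j
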